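-- pv_equiv track=rewrite | github.com/benlaflen/Hippocampus-Segmentation | SegmentAnything/SegmentHippoCenterVentricle.py | generate_negative_points_outside_center_x
-- ===== SOURCE A (Python) =====
-- def generate_negative_points_outside_center_x(center_y, start_x, end_x, width, num_points=10):
--     # Generate negative points systematically outside the center region along a fixed y-coordinate
--     negative_points = []
--     step_x = max(1, width // num_points)  # Step size for x-coordinates to distribute points
--
--     for i in range(num_points):
--         if i % 2 == 0:  # Alternate points on the left side of the center region
--             x = (start_x - (i // 2 + 1) * step_x) % width
--         else:  # Alternate points on the right side of the center region
--             x = (end_x + (i // 2 + 1) * step_x) % width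
--
--         # Add the point with a fixed y-coordinate (center_y)
--         negative_points.append((x, center_y))
--
--     return negative_points
-- ===== SOURCE B (Python) =====
-- def generate_negative_points_outside_center_x(center_y, start_x, end_x, width, num_points=10):
--     # Two separate passes (left points, right points), then interleave them.
--     step_x = max(1, width // num_points)
--     left = [((start_x - k * step_x) % width, center_y)
--             for k in range(1, num_points - num_points // 2 + 1)]
--     right = [((end_x + k * step_x) % width, center_y)
--              for k in range(1, num_points // 2 + 1)]
--     result = []
--     for l, r in zip(left, right):
--         result += [l, r]
--     if len(left) > len(right):
--         result.append(left[-1])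
--     return result
-- ===== Notes on version B (the rewrite author's own statement) =====
-- stated objective: alternative
-- what changed: Instead of one loop over point indices with a parity branch, B builds the left-side and right-side point lists in two separate passes over step indices and then interleaves them, appending the odd leftover left point.
import Mathlib
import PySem

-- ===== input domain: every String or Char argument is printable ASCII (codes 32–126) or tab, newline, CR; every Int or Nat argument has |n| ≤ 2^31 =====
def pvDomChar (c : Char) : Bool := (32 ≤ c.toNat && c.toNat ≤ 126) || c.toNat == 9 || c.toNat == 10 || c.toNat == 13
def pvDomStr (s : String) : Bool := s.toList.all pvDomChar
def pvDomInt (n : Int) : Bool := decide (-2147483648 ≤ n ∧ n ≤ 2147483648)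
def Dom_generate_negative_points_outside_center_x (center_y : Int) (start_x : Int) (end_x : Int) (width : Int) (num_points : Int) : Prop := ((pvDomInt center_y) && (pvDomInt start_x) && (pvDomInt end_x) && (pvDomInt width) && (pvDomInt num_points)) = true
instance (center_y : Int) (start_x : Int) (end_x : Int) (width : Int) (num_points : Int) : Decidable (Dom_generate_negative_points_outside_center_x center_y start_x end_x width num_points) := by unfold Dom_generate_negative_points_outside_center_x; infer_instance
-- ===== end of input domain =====

-- B builds the left and right point lists in two separate passes and interleaves them (alternative decomposition, same cost).

-- ===== PORT A =====
def generate_negative_points_outside_center_x (center_y : Int) (start_x : Int) (end_x : Int) (width : Int) (num_points : Int) : List (Int × Int) :=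
  let step_x := max 1 (PySem.Int.floordiv width num_points)
  (PySem.List.pyRange 0 num_points 1).foldl (fun acc i =>
    acc ++ [((if PySem.Int.mod i 2 = 0 then
                PySem.Int.mod (start_x - (PySem.Int.floordiv i 2 + 1) * step_x) width
              else
                PySem.Int.mod (end_x + (PySem.Int.floordiv i 2 + 1) * step_x) width), center_y)]) []

-- ===== PORT B =====
def generate_negative_points_outside_center_x_alt (center_y : Int) (start_x : Int) (end_x : Int) (width : Int) (num_points : Int) : List (Int × Int) :=
  let step_x := max 1 (PySem.Int.floordiv width num_points)
  let left := (PySem.List.pyRange 1 (num_points - PySem.Int.floordiv num_points 2 + 1) 1).map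
      (fun k => (PySem.Int.mod (start_x - k * step_x) width, center_y))
  let right := (PySem.List.pyRange 1 (PySem.Int.floordiv num_points 2 + 1) 1).map
      (fun k => (PySem.Int.mod (end_x + k * step_x) width, center_y))
  let res := (left.zip right).foldl (fun acc p => acc ++ [p.1, p.2]) []
  if right.length < left.length then
    match PySem.List.pyGet? left (-1) with
    | some a => res ++ [a]
    | none => res
  else res

-- ===== PRECONDITION & SPEC =====
-- Pre_ excludes exactly the inputs where Python A raises: num_points = 0 (ZeroDivisionError in width // num_points)
-- and num_points > 0 with width = 0 (ZeroDivisionError in x % width).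
def Pre_generate_negative_points_outside_center_x (center_y : Int) (start_x : Int) (end_x : Int) (width : Int) (num_points : Int) : Prop :=
  num_points ≠ 0 ∧ (0 < num_points → width ≠ 0)
instance (center_y : Int) (start_x : Int) (end_x : Int) (width : Int) (num_points : Int) : Decidable (Pre_generate_negative_points_outside_center_x center_y start_x end_x width num_points) := by unfold Pre_generate_negative_points_outside_center_x; infer_instance

def pvWitness_generate_negative_points_outside_center_x : Int × Int × Int × Int × Int := (3, 5, 15, 20, 7)

def Spec_generate_negative_points_outside_center_x (center_y : Int) (start_x : Int) (end_x : Int) (width : Int) (num_points : Int) (out : List (Int × Int)) : Prop := out = generate_negative_points_outside_center_x_alt center_y start_x end_x width num_points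
instance (center_y : Int) (start_x : Int) (end_x : Int) (width : Int) (num_points : Int) (out : List (Int × Int)) : Decidable (Spec_generate_negative_points_outside_center_x center_y start_x end_x width num_points out) := by unfold Spec_generate_negative_points_outside_center_x; infer_instance

-- ===== CLAIM (what is proved, stated in full; the proofs are below) =====
def Claim_equal_generate_negative_points_outside_center_x : Prop := ∀ (center_y : Int) (start_x : Int) (end_x : Int) (width : Int) (num_points : Int), Dom_generate_negative_points_outside_center_x center_y start_x end_x width num_points → Pre_generate_negative_points_outside_center_x center_y start_x end_x width num_points → Spec_generate_negative_points_outside_center_x center_y start_x end_x width num_points (generate_negative_points_outside_center_x center_y start_x end_x width num_points)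

-- ===== LEMMAS AND PROOFS =====

-- what B's interleaving loop computes
def pvPairUp {α : Type} : List α → List α → List α
  | a :: as, b :: bs => a :: b :: pvPairUp as bs
  | _, _ => []

theorem pv_zip_foldl {α : Type} (ls : List α) (rs : List α) (acc : List α) :
    (ls.zip rs).foldl (fun acc p => acc ++ [p.1, p.2]) acc = acc ++ pvPairUp ls rs := by
  induction ls generalizing rs acc with
  | nil => simp [pvPairUp]
  | cons a as ih =>
    cases rs with
    | nil => simp [pvPairUp]
    | cons b bs => simp [pvPairUp, ih]

theorem pvPairUp_append {α : Type} (ls rs : List α) (a b : α) (h : ls.length = rs.length) :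
    pvPairUp (ls ++ [a]) (rs ++ [b]) = pvPairUp ls rs ++ [a, b] := by
  induction ls generalizing rs with
  | nil => cases rs with
    | nil => simp [pvPairUp]
    | cons r rs => simp at h
  | cons x xs ih =>
    cases rs with
    | nil => simp at h
    | cons r rs =>
      simp only [List.cons_append, pvPairUp, List.length_cons] at *
      rw [ih rs (by omega)]

theorem pvPairUp_trunc {α : Type} (ls rs : List α) (a : α) (h : ls.length = rs.length) :
    pvPairUp (ls ++ [a]) rs = pvPairUp ls rs := by
  induction ls generalizing rs with
  | nil => cases rs with
    | nil => simp [pvPairUp]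
    | cons r rs => simp at h
  | cons x xs ih =>
    cases rs with
    | nil => simp at h
    | cons r rs =>
      simp only [List.cons_append, pvPairUp, List.length_cons] at *
      rw [ih rs (by omega)]

theorem pv_key_even {α : Type} (L R : Nat → α) (f : Nat) :
    pvPairUp ((List.range f).map (fun k => L (k + 1))) ((List.range f).map (fun k => R (k + 1)))
      = (List.range (2 * f)).map (fun i => if i % 2 = 0 then L (i / 2 + 1) else R (i / 2 + 1)) := by
  induction f with
  | zero => simp [pvPairUp]
  | succ f ih =>
    rw [List.range_succ, List.map_append, List.map_append]
    simp only [List.map_cons, List.map_nil]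
    rw [pvPairUp_append _ _ _ _ (by simp),
      show 2 * (f + 1) = 2 * f + 1 + 1 by omega,
      List.range_succ, List.range_succ, List.map_append, List.map_append, ih]
    have h1 : (2 * f) % 2 = 0 := by omega
    have h2 : (2 * f + 1) % 2 ≠ 0 := by omega
    have h3 : 2 * f / 2 = f := by omega
    have h4 : (2 * f + 1) / 2 = f := by omega
    simp [h1, h4]

theorem generate_negative_points_outside_center_x_eq (center_y start_x end_x width num_points : Int) :
    generate_negative_points_outside_center_x center_y start_x end_x width num_points
      = generate_negative_points_outside_center_x_alt center_y start_x end_x width num_points := by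
  unfold generate_negative_points_outside_center_x generate_negative_points_outside_center_x_alt
  set step_x := max 1 (PySem.Int.floordiv width num_points) with hstep
  set LN : Nat → Int × Int := fun j => (PySem.Int.mod (start_x - (j : Int) * step_x) width, center_y) with hLN
  set RN : Nat → Int × Int := fun j => (PySem.Int.mod (end_x + (j : Int) * step_x) width, center_y) with hRN
  have hfd : PySem.Int.floordiv num_points 2 = num_points / 2 :=
    PySem.Int.floordiv_eq_ediv_of_pos (by norm_num)
  by_cases hn : num_points ≤ 0
  · -- empty everywhere
    rw [PySem.List.pyRange_one_eq_nil hn,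
      PySem.List.pyRange_one_eq_nil (a := (1:Int)) (by omega),
      PySem.List.pyRange_one_eq_nil (a := (1:Int)) (by omega)]
    simp
  · rw [not_le] at hn
    obtain ⟨m, hm⟩ : ∃ m : Nat, num_points = (m : Int) := ⟨num_points.toNat, by omega⟩
    subst hm
    have hfd2 : (m : Int) / 2 = ((m / 2 : Nat) : Int) := by omega
    -- A side: a map over List.range m
    rw [PySem.List.foldl_append_singleton_eq_map, PySem.List.pyRange_one]
    have hA : (fun i : Int => ((if PySem.Int.mod i 2 = 0 then
                PySem.Int.mod (start_x - (PySem.Int.floordiv i 2 + 1) * step_x) width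
              else
                PySem.Int.mod (end_x + (PySem.Int.floordiv i 2 + 1) * step_x) width), center_y))
            ∘ (fun k : Nat => (0 : Int) + (k : Int))
          = fun k : Nat => if k % 2 = 0 then LN (k / 2 + 1) else RN (k / 2 + 1) := by
      funext k
      simp only [Function.comp, zero_add]
      have hmod : PySem.Int.mod (k : Int) 2 = ((k % 2 : Nat) : Int) := PySem.Int.mod_natCast k 2
      have hdiv : PySem.Int.floordiv (k : Int) 2 = ((k / 2 : Nat) : Int) := PySem.Int.floordiv_natCast k 2
      by_cases hk : k % 2 = 0
      · rw [if_pos (by rw [hmod, hk]; rfl), if_pos hk, hLN]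
        simp only [hdiv]
        push_cast
        ring_nf
      · rw [if_neg (by rw [hmod]; omega), if_neg hk, hRN]
        simp only [hdiv]
        push_cast
        ring_nf
    simp only [List.map_map]
    rw [hA]
    have hmt : ((m : Int) - 0).toNat = m := by omega
    rw [hmt]
    -- B side: left and right as maps over List.range
    have hleft : (PySem.List.pyRange 1 ((m : Int) - PySem.Int.floordiv (m : Int) 2 + 1) 1).map
        (fun k => (PySem.Int.mod (start_x - k * step_x) width, center_y))
        = (List.range (m - m / 2)).map (fun k => LN (k + 1)) := by
      rw [PySem.List.pyRange_one, List.map_map]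
      have : ((m : Int) - PySem.Int.floordiv (m : Int) 2 + 1 - 1).toNat = m - m / 2 := by
        rw [hfd]; omega
      rw [this]
      apply List.map_congr_left
      intro k _
      simp only [Function.comp, hLN]
      push_cast
      ring_nf
    have hright : (PySem.List.pyRange 1 (PySem.Int.floordiv (m : Int) 2 + 1) 1).map
        (fun k => (PySem.Int.mod (end_x + k * step_x) width, center_y))
        = (List.range (m / 2)).map (fun k => RN (k + 1)) := by
      rw [PySem.List.pyRange_one, List.map_map]
      have : (PySem.Int.floordiv (m : Int) 2 + 1 - 1).toNat = m / 2 := by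
        rw [hfd]; omega
      rw [this]
      apply List.map_congr_left
      intro k _
      simp only [Function.comp, hRN]
      push_cast
      ring_nf
    rw [hleft, hright, pv_zip_foldl]
    simp only [List.nil_append, List.length_map, List.length_range]
    rcases Nat.even_or_odd m with ⟨f, hf⟩ | ⟨f, hf⟩
    · -- m = 2 * f : equal lengths, no trailing point
      have h1 : m - m / 2 = f := by omega
      have h2 : m / 2 = f := by omega
      rw [h1, h2, if_neg (by omega), pv_key_even, hf, two_mul]
    · -- m = 2 * f + 1 : left one longer, trailing left point
      have h1 : m - m / 2 = f + 1 := by omega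
      have h2 : m / 2 = f := by omega
      rw [h1, h2, if_pos (by omega)]
      rw [List.range_succ, List.map_append]
      simp only [List.map_cons, List.map_nil]
      rw [PySem.List.pyGet?_neg_one_append_singleton]
      rw [pvPairUp_trunc _ _ _ (by simp), pv_key_even]
      rw [hf, show 2 * f + 1 = (2 * f) + 1 by rfl, List.range_succ, List.map_append]
      have h3 : (2 * f) % 2 = 0 := by omega
      have h4 : 2 * f / 2 = f := by omega
      simp [h3, h4]

-- ===== VERDICT (by name: the statement is the Claim_ definition above) =====
theorem generate_negative_points_outside_center_x_spec : Claim_equal_generate_negative_points_outside_center_x := by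
  intro center_y start_x end_x width num_points _ _
  unfold Spec_generate_negative_points_outside_center_x
  exact generate_negative_points_outside_center_x_eq center_y start_x end_x width num_points
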